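-- pv_equiv track=rewrite | github.com/toilaluan/beacon-hf | dist_dataloader.py | insert_checkpoints
-- ===== SOURCE A (Python) =====
-- from typing import Generator, Iterable, List, Optional, Sequence, Tuple
--
-- def insert_checkpoints(token_ids: Sequence[int], stride: int, ckpt_id: int) -> List[int]:
--     """
--     Insert checkpoint tokens every `stride` tokens: [.. stride .. CKPT .. stride .. CKPT ..]
--     """
--     if stride <= 0:
--         return list(token_ids)
--
--     with_ckpts: List[int] = []
--     for start in range(0, len(token_ids), stride):
--         end = min(start + stride, len(token_ids))
--         with_ckpts.extend(token_ids[start:end])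
--         if end < len(token_ids):
--             with_ckpts.append(ckpt_id)
--     return with_ckpts
-- ===== SOURCE B (Python) =====
-- from typing import List, Sequence
--
-- def insert_checkpoints(token_ids: Sequence[int], stride: int, ckpt_id: int) -> List[int]:
--     if stride <= 0:
--         return list(token_ids)
--     n = len(token_ids)
--     out: List[int] = []
--     for i, t in enumerate(token_ids):
--         out.append(t)
--         if (i + 1) % stride == 0 and i + 1 < n:
--             out.append(ckpt_id)
--     return out
-- ===== Notes on version B (the rewrite author's own statement) =====
-- stated objective: simpler
-- what changed: Replaces the stride-chunked range loop with slice extends by a single element-wise enumerate pass that appends the token and, via a modulo test on the index, the checkpoint token; no slicing or min arithmetic.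
import Mathlib
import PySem

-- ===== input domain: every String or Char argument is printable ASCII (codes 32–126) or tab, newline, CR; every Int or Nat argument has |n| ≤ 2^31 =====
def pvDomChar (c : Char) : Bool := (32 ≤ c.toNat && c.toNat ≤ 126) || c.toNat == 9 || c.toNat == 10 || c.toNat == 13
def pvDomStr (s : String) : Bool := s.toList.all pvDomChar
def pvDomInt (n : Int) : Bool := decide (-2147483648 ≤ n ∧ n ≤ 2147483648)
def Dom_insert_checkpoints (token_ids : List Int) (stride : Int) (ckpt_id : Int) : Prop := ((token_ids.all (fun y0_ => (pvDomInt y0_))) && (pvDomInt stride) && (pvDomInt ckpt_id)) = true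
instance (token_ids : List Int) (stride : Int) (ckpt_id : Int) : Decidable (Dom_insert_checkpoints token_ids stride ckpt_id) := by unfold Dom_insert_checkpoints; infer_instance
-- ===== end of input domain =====

-- B replaces A's stride-chunked slice loop by a single element-wise enumerate pass with a modulo index test (objective: simpler).


-- ===== PORT A =====
def insert_checkpoints (token_ids : List Int) (stride : Int) (ckpt_id : Int) : List Int :=
  if stride ≤ 0 then token_ids
  else
    (PySem.List.pyRange 0 (token_ids.length : Int) stride).foldl
      (fun with_ckpts start =>
        let «end» := min (start + stride) (token_ids.length : Int)
        let with_ckpts := with_ckpts ++ PySem.List.slice token_ids (some start) (some «end»)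
        if «end» < (token_ids.length : Int) then with_ckpts ++ [ckpt_id] else with_ckpts)
      []

-- ===== PORT B =====
def insert_checkpoints_alt (token_ids : List Int) (stride : Int) (ckpt_id : Int) : List Int :=
  if stride ≤ 0 then token_ids
  else
    (PySem.List.enumerate token_ids).foldl
      (fun out p =>
        let out := out ++ [p.2]
        if PySem.Int.mod (p.1 + 1) stride = 0 ∧ p.1 + 1 < (token_ids.length : Int) then
          out ++ [ckpt_id]
        else out)
      []

-- ===== PRECONDITION & SPEC =====
def Spec_insert_checkpoints (token_ids : List Int) (stride : Int) (ckpt_id : Int) (out : List Int) : Prop := out = insert_checkpoints_alt token_ids stride ckpt_id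
instance (token_ids : List Int) (stride : Int) (ckpt_id : Int) (out : List Int) : Decidable (Spec_insert_checkpoints token_ids stride ckpt_id out) := by unfold Spec_insert_checkpoints; infer_instance

-- ===== CLAIM (what is proved, stated in full; the proofs are below) =====
def Claim_equal_insert_checkpoints : Prop := ∀ (token_ids : List Int) (stride : Int) (ckpt_id : Int), Dom_insert_checkpoints token_ids stride ckpt_id → Spec_insert_checkpoints token_ids stride ckpt_id (insert_checkpoints token_ids stride ckpt_id)

-- ===== LEMMAS AND PROOFS =====

-- the per-chunk payload of A's loop body
def icA (token_ids : List Int) (stride ckpt_id start : Int) : List Int :=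
  PySem.List.slice token_ids (some start) (some (min (start + stride) (token_ids.length : Int))) ++
    (if min (start + stride) (token_ids.length : Int) < (token_ids.length : Int) then [ckpt_id] else [])

-- the per-element payload of B's loop body
def icB (token_ids : List Int) (stride ckpt_id : Int) (p : Int × Int) : List Int :=
  [p.2] ++ (if PySem.Int.mod (p.1 + 1) stride = 0 ∧ p.1 + 1 < (token_ids.length : Int) then [ckpt_id] else [])

-- reference: one element at a time with a running absolute index
def icRef (s n : Nat) (ckpt_id : Int) : List Int → Nat → List Int
  | [], _ => []
  | x :: xs, j =>
      if (j + 1) % s = 0 ∧ j + 1 < n then x :: ckpt_id :: icRef s n ckpt_id xs (j + 1)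
      else x :: icRef s n ckpt_id xs (j + 1)

theorem pyRange_pos_eq_nil (a b s : Int) (hs : 0 < s) (h : b ≤ a) :
    PySem.List.pyRange a b s = [] := by
  rw [PySem.List.pyRange_of_pos _ _ hs]
  simp [show ¬ a < b by omega]

theorem pyRange_pos_cons (a b s : Int) (hs : 0 < s) (h : a < b) :
    PySem.List.pyRange a b s = a :: PySem.List.pyRange (a + s) b s := by
  rw [PySem.List.pyRange_of_pos _ _ hs, PySem.List.pyRange_of_pos _ _ hs]
  have hy : b - a + s - 1 = (b - (a + s) + s - 1) + 1 * s := by ring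
  have hcnt : ((b - a + s - 1) / s).toNat = ((b - (a + s) + s - 1) / s).toNat + 1 := by
    have h1 : (b - a + s - 1) / s = (b - (a + s) + s - 1) / s + 1 := by
      rw [hy, Int.add_mul_ediv_right _ _ (by omega : s ≠ 0)]
    by_cases h2 : a + s < b
    · have : 0 ≤ (b - (a + s) + s - 1) / s :=
        Int.ediv_nonneg (by omega) (by omega)
      omega
    · have : (b - (a + s) + s - 1) / s = 0 :=
        Int.ediv_eq_zero_of_lt (by omega) (by omega)
      omega
  rw [if_pos h, hcnt]
  by_cases h2 : a + s < b
  · rw [if_pos h2, List.range_succ_eq_map]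
    simp only [List.map_cons, List.map_map, Nat.cast_zero, mul_zero, add_zero]
    congr 1
    exact List.map_congr_left (fun x _ => by simp [Function.comp]; push_cast; ring)
  · rw [if_neg h2]
    have : (b - (a + s) + s - 1) / s = 0 :=
      Int.ediv_eq_zero_of_lt (by omega) (by omega)
    rw [this]
    simp

-- modulo condition bridge
theorem icMod_iff (m s : Nat) (hs : 0 < s) :
    PySem.Int.mod ((m : Nat) : Int) ((s : Nat) : Int) = 0 ↔ m % s = 0 := by
  rw [PySem.Int.mod_eq_zero_iff_dvd, Int.natCast_dvd_natCast]
  exact Nat.dvd_iff_mod_eq_zero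

-- B's flatMap equals the reference
theorem flatMap_icB (token_ids : List Int) (stride ckpt_id : Int) (s : Nat)
    (hs : 0 < s) (hst : stride = (s : Int)) :
    ∀ (ys : List Int) (j : Nat),
      (PySem.List.enumerate ys (j : Int)).flatMap (icB token_ids stride ckpt_id) =
        icRef s token_ids.length ckpt_id ys j := by
  intro ys
  induction ys with
  | nil => intro j; simp [PySem.List.enumerate_nil, icRef]
  | cons x xs ih =>
    intro j
    rw [PySem.List.enumerate_cons]
    simp only [List.flatMap_cons, icB, icRef]
    have hj1 : ((j : Int) + 1) = ((j + 1 : Nat) : Int) := by push_cast; ring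
    rw [hj1, ih (j + 1)]
    have hcond : (PySem.Int.mod (((j + 1 : Nat) : Int)) stride = 0 ∧ ((j + 1 : Nat) : Int) < (token_ids.length : Int))
        ↔ ((j + 1) % s = 0 ∧ j + 1 < token_ids.length) := by
      rw [hst, icMod_iff (j + 1) s hs, Nat.cast_lt]
    by_cases hc : (j + 1) % s = 0 ∧ j + 1 < token_ids.length
    · rw [if_pos (hcond.mpr hc), if_pos hc]
      simp
    · rw [if_neg (fun h => hc (hcond.mp h)), if_neg hc]
      simp

-- the reference is the identity when every future multiple-of-s index is past n
theorem icRef_id (s n : Nat) (ckpt_id : Int) :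
    ∀ (ys : List Int) (j : Nat),
      (∀ t, t < ys.length → (j + t + 1) % s = 0 → n ≤ j + t + 1) →
      icRef s n ckpt_id ys j = ys := by
  intro ys
  induction ys with
  | nil => intro _ _; rfl
  | cons x xs ih =>
    intro j h
    have hhead : ¬ ((j + 1) % s = 0 ∧ j + 1 < n) := by
      rintro ⟨h1, h2⟩
      have := h 0 (by simp) (by omega)
      omega
    simp only [icRef, if_neg hhead]
    rw [ih (j + 1) (fun t ht hm => by
      have e : j + (t + 1) + 1 = j + 1 + t + 1 := by ring
      have := h (t + 1) (by simpa using ht) (by rw [e]; exact hm)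
      omega)]

-- the reference consumes a chunk up to the next trigger
theorem icRef_chunk (s n : Nat) (ckpt_id : Int) (hs : 0 < s) :
    ∀ (r : Nat), r < s → ∀ (ys : List Int) (j : Nat),
      (j + r + 1) % s = 0 → r < ys.length → j + r + 1 < n →
      icRef s n ckpt_id ys j =
        ys.take (r + 1) ++ ckpt_id :: icRef s n ckpt_id (ys.drop (r + 1)) (j + r + 1) := by
  intro r
  induction r with
  | zero =>
    intro _ ys j hm hl hn
    match ys with
    | x :: xs =>
      simp only [icRef, if_pos (show (j + 1) % s = 0 ∧ j + 1 < n from ⟨by simpa using hm, by omega⟩)]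
      simp
  | succ r ih =>
    intro hr ys j hm hl hn
    match ys with
    | x :: xs =>
      have hhead : ¬ ((j + 1) % s = 0 ∧ j + 1 < n) := by
        rintro ⟨h1, _⟩
        have d1 : s ∣ j + 1 := Nat.dvd_of_mod_eq_zero h1
        have d2 : s ∣ j + (r + 1) + 1 := Nat.dvd_of_mod_eq_zero hm
        have d3 : s ∣ r + 1 := by
          have h3 := Nat.dvd_sub d2 d1
          rwa [show j + (r + 1) + 1 - (j + 1) = r + 1 by omega] at h3
        have := Nat.le_of_dvd (by omega) d3
        omega
      simp only [icRef, if_neg hhead]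
      rw [ih (by omega) xs (j + 1) (by have : j + 1 + r + 1 = j + (r + 1) + 1 := by ring
                                       rw [this]; exact hm)
            (by simpa using Nat.lt_of_succ_lt_succ (by simpa using hl))
            (by omega)]
      have : j + 1 + r + 1 = j + (r + 1) + 1 := by ring
      rw [this]
      simp

-- A's flatMap equals the reference (chunk induction on the remaining length)
theorem flatMap_icA (token_ids : List Int) (stride ckpt_id : Int) (s : Nat)
    (hs : 0 < s) (hst : stride = (s : Int)) :
    ∀ (m k : Nat), token_ids.length - k = m → s ∣ k →
      (PySem.List.pyRange (k : Int) (token_ids.length : Int) stride).flatMap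
          (icA token_ids stride ckpt_id) =
        icRef s token_ids.length ckpt_id (token_ids.drop k) k := by
  intro m
  induction m using Nat.strong_induction_on with
  | _ m ih =>
    intro k hm hdvd
    by_cases hkn : token_ids.length ≤ k
    · rw [pyRange_pos_eq_nil _ _ _ (by rw [hst]; exact_mod_cast hs) (by exact_mod_cast hkn)]
      rw [List.drop_eq_nil_of_le hkn]
      simp [icRef]
    · push_neg at hkn
      have hspos : (0 : Int) < stride := by rw [hst]; exact_mod_cast hs
      rw [pyRange_pos_cons _ _ _ hspos (by exact_mod_cast hkn), List.flatMap_cons]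
      have hks : (k : Int) + stride = ((k + s : Nat) : Int) := by rw [hst]; push_cast; ring
      have hicA : icA token_ids stride ckpt_id (k : Int) =
          (token_ids.drop k).take (min (k + s) token_ids.length - k) ++
            (if k + s < token_ids.length then [ckpt_id] else []) := by
        unfold icA
        rw [hks, show min ((k + s : Nat) : Int) ((token_ids.length : Nat) : Int)
              = ((min (k + s) token_ids.length : Nat) : Int) from (by push_cast; omega),
            PySem.List.slice_natCast]
        congr 1
        by_cases hb : k + s < token_ids.length
        · rw [if_pos (by exact_mod_cast (by omega : min (k + s) token_ids.length < token_ids.length)),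
              if_pos hb]
        · rw [if_neg (by push_cast; omega), if_neg hb]
      rw [hks, hicA]
      by_cases hb : k + s < token_ids.length
      · rw [ih (token_ids.length - (k + s)) (by omega) (k + s) rfl (Nat.dvd_add hdvd dvd_rfl)]
        rw [icRef_chunk s token_ids.length ckpt_id hs (s - 1) (by omega) (token_ids.drop k) k
              (by rw [show k + (s - 1) + 1 = k + s by omega]
                  exact Nat.dvd_iff_mod_eq_zero.mp (Nat.dvd_add hdvd dvd_rfl))
              (by simp; omega) (by omega)]
        rw [show min (k + s) token_ids.length - k = s - 1 + 1 by omega, if_pos hb,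
            show k + (s - 1) + 1 = k + s by omega, List.drop_drop,
            show k + (s - 1 + 1) = k + s by omega]
        simp
      · rw [pyRange_pos_eq_nil _ _ _ hspos (by exact_mod_cast (by omega : token_ids.length ≤ k + s))]
        rw [icRef_id s token_ids.length ckpt_id (token_ids.drop k) k (by
          intro t ht hmod
          simp at ht
          have d1 : s ∣ k + t + 1 := Nat.dvd_of_mod_eq_zero hmod
          have d2 : s ∣ t + 1 := by
            have h3 := Nat.dvd_sub d1 hdvd
            rwa [show k + t + 1 - k = t + 1 by omega] at h3
          have := Nat.le_of_dvd (by omega) d2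
          omega)]
        rw [if_neg (by omega), show min (k + s) token_ids.length - k = token_ids.length - k by omega]
        rw [List.take_of_length_le (by simp)]
        simp

-- ===== VERDICT (by name: the statement is the Claim_ definition above) =====
theorem insert_checkpoints_spec : Claim_equal_insert_checkpoints := by
  intro token_ids stride ckpt_id _
  unfold Spec_insert_checkpoints insert_checkpoints insert_checkpoints_alt
  by_cases hneg : stride ≤ 0
  · rw [if_pos hneg, if_pos hneg]
  · rw [if_neg hneg, if_neg hneg]
    push_neg at hneg
    set s := stride.toNat with hsdef
    have hs : 0 < s := by omega
    have hst : stride = (s : Int) := by omega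
    have hA := PySem.List.foldl_congr_mem
        (l := PySem.List.pyRange 0 (token_ids.length : Int) stride) (init := ([] : List Int))
        (f := fun with_ckpts start =>
          let «end» := min (start + stride) (token_ids.length : Int)
          let with_ckpts := with_ckpts ++ PySem.List.slice token_ids (some start) (some «end»)
          if «end» < (token_ids.length : Int) then with_ckpts ++ [ckpt_id] else with_ckpts)
        (g := fun acc start => acc ++ icA token_ids stride ckpt_id start)
        (by intro acc x _
            unfold icA
            by_cases h : min (x + stride) (token_ids.length : Int) < (token_ids.length : Int) <;>
              simp [h])
    have hB := PySem.List.foldl_congr_mem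
        (l := PySem.List.enumerate token_ids) (init := ([] : List Int))
        (f := fun out p =>
          let out := out ++ [p.2]
          if PySem.Int.mod (p.1 + 1) stride = 0 ∧ p.1 + 1 < (token_ids.length : Int) then
            out ++ [ckpt_id]
          else out)
        (g := fun acc p => acc ++ icB token_ids stride ckpt_id p)
        (by intro acc p _
            unfold icB
            by_cases h : PySem.Int.mod (p.1 + 1) stride = 0 ∧ p.1 + 1 < (token_ids.length : Int) <;>
              simp [h])
    rw [hA, hB, PySem.List.foldl_append_eq_flatMap, PySem.List.foldl_append_eq_flatMap]
    simp only [List.nil_append]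
    have h1 := flatMap_icA token_ids stride ckpt_id s hs hst token_ids.length 0 (by omega)
      (Nat.dvd_zero s)
    have h2 := flatMap_icB token_ids stride ckpt_id s hs hst token_ids 0
    simp only [Nat.cast_zero, List.drop_zero] at h1 h2
    rw [h1, h2]
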